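-- pv_equiv track=rewrite | github.com/SardineBob/AnalyzeProjectCode | git_analyzer.py | _get_change_distribution
-- ===== SOURCE A (Python) =====
-- from typing import Dict, List, Any, Optional
--
-- def _get_change_distribution(file_changes: Dict[str, int]) -> Dict[str, int]:
--     """
--     計算檔案異動頻率分佈
--
--     Args:
--         file_changes: 檔案異動次數字典
--
--     Returns:
--         異動頻率分佈統計
--     """
--     distribution = {
--         'low': 0,       # 1-5 次
--         'medium': 0,    # 6-15 次
--         'high': 0,      # 16-30 次
--         'very_high': 0  # > 30 次
--     }
--
--     for count in file_changes.values():
--         if count <= 5: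
--             distribution['low'] += 1
--         elif count <= 15:
--             distribution['medium'] += 1
--         elif count <= 30:
--             distribution['high'] += 1
--         else:
--             distribution['very_high'] += 1
--
--     return distribution
-- ===== SOURCE B (Python) =====
-- def _get_change_distribution(file_changes):
--     """Bucket counts via cumulative threshold counts and differencing (no per-element dispatch)."""
--     vs = list(file_changes.values())
--     le5 = sum(1 for v in vs if v <= 5)
--     le15 = sum(1 for v in vs if v <= 15)
--     le30 = sum(1 for v in vs if v <= 30)
--     return {
--         'low': le5,
--         'medium': le15 - le5,
--         'high': le30 - le15,
--         'very_high': len(vs) - le30,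
--     }
-- ===== Notes on version B (the rewrite author's own statement) =====
-- stated objective: alternative
-- what changed: Replaces the per-element if/elif bucket dispatch into a mutable dict by cumulative threshold counting: three counting passes give how many values are <=5, <=15, <=30, and each bucket is a difference of consecutive cumulative counts.
import Mathlib
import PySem

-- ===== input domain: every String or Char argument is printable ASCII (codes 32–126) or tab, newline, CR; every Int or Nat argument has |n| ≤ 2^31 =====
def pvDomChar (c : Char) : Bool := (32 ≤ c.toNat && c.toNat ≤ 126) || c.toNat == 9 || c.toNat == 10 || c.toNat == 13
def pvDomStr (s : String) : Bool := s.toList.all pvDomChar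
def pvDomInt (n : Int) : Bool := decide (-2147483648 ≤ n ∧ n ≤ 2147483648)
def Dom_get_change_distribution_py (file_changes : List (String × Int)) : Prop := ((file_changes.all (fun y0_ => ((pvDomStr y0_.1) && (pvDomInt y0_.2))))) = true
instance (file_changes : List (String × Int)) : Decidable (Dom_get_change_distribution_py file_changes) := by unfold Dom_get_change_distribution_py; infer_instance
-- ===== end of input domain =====

-- B replaces A's per-element if/elif dispatch into a mutable dict by cumulative threshold
-- counting passes (counts of values ≤5, ≤15, ≤30) and bucket = difference of consecutive counts.


-- ===== PORT A =====
def get_change_distribution_py (file_changes : List (String × Int)) : List (String × Int) :=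
  let distribution : PySem.Dict String Int :=
    PySem.Dict.ofList [("low", 0), ("medium", 0), ("high", 0), ("very_high", 0)]
  let final := (PySem.Dict.values (PySem.Dict.ofList file_changes)).foldl
    (fun d count =>
      if count ≤ 5 then d.insert "low" (d.getD "low" 0 + 1)
      else if count ≤ 15 then d.insert "medium" (d.getD "medium" 0 + 1)
      else if count ≤ 30 then d.insert "high" (d.getD "high" 0 + 1)
      else d.insert "very_high" (d.getD "very_high" 0 + 1))
    distribution
  final.items

-- ===== PORT B =====
def get_change_distribution_py_alt (file_changes : List (String × Int)) : List (String × Int) :=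
  let vs := PySem.Dict.values (PySem.Dict.ofList file_changes)
  let le5 : Int := vs.countP (fun v => decide (v ≤ 5))
  let le15 : Int := vs.countP (fun v => decide (v ≤ 15))
  let le30 : Int := vs.countP (fun v => decide (v ≤ 30))
  [("low", le5), ("medium", le15 - le5), ("high", le30 - le15),
   ("very_high", (vs.length : Int) - le30)]

-- ===== PRECONDITION & SPEC =====
def Spec_get_change_distribution_py (file_changes : List (String × Int)) (out : List (String × Int)) : Prop := out = get_change_distribution_py_alt file_changes
instance (file_changes : List (String × Int)) (out : List (String × Int)) : Decidable (Spec_get_change_distribution_py file_changes out) := by unfold Spec_get_change_distribution_py; infer_instance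

-- ===== CLAIM (what is proved, stated in full; the proofs are below) =====
def Claim_equal_get_change_distribution_py : Prop := ∀ (file_changes : List (String × Int)), Dom_get_change_distribution_py file_changes → Spec_get_change_distribution_py file_changes (get_change_distribution_py file_changes)

-- ===== LEMMAS AND PROOFS =====

-- Invariant: A's dict fold over any value list keeps the 4-entry shape, and each counter
-- ends as its start plus the count of values falling in its range.
theorem pv_fold_eq (vs : List Int) : ∀ (a b c d : Int),
    (vs.foldl
      (fun (st : PySem.Dict String Int) count =>
        if count ≤ 5 then st.insert "low" (st.getD "low" 0 + 1)
        else if count ≤ 15 then st.insert "medium" (st.getD "medium" 0 + 1)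
        else if count ≤ 30 then st.insert "high" (st.getD "high" 0 + 1)
        else st.insert "very_high" (st.getD "very_high" 0 + 1))
      (PySem.Dict.mk [("low", a), ("medium", b), ("high", c), ("very_high", d)])).items
    = [("low", a + (vs.countP (fun v => decide (v ≤ 5)) : Int)),
       ("medium", b + (vs.countP (fun v => decide (5 < v) && decide (v ≤ 15)) : Int)),
       ("high", c + (vs.countP (fun v => decide (15 < v) && decide (v ≤ 30)) : Int)),
       ("very_high", d + (vs.countP (fun v => decide (30 < v)) : Int))] := by
  induction vs with
  | nil => intro a b c d; simp
  | cons v vs ih =>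
    intro a b c d
    simp only [List.foldl_cons, List.countP_cons]
    by_cases h5 : v ≤ 5
    · have hA : ((PySem.Dict.mk [("low", a), ("medium", b), ("high", c), ("very_high", d)]).insert "low"
          ((PySem.Dict.mk [("low", a), ("medium", b), ("high", c), ("very_high", d)]).getD "low" 0 + 1))
          = PySem.Dict.mk [("low", a + 1), ("medium", b), ("high", c), ("very_high", d)] := by
        apply PySem.Dict.ext
        simp [PySem.Dict.insert, PySem.Dict.getD, PySem.Dict.get?, PySem.Dict.contains]
      have g2 : ¬ (5:Int) < v := by omega
      simp only [if_pos h5, hA, ih (a+1) b c d]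
      simp [h5, g2]
      omega
    · by_cases h15 : v ≤ 15
      · have hA : ((PySem.Dict.mk [("low", a), ("medium", b), ("high", c), ("very_high", d)]).insert "medium"
            ((PySem.Dict.mk [("low", a), ("medium", b), ("high", c), ("very_high", d)]).getD "medium" 0 + 1))
            = PySem.Dict.mk [("low", a), ("medium", b + 1), ("high", c), ("very_high", d)] := by
          apply PySem.Dict.ext
          simp [PySem.Dict.insert, PySem.Dict.getD, PySem.Dict.get?, PySem.Dict.contains]
        have g1 : (5:Int) < v := by omega
        have g3 : ¬ (15:Int) < v := by omega
        have g4 : ¬ (30:Int) < v := by omega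
        simp only [if_neg h5, if_pos h15, hA, ih a (b+1) c d]
        simp [h5, g1, h15, g3, g4]
        omega
      · by_cases h30 : v ≤ 30
        · have hA : ((PySem.Dict.mk [("low", a), ("medium", b), ("high", c), ("very_high", d)]).insert "high"
              ((PySem.Dict.mk [("low", a), ("medium", b), ("high", c), ("very_high", d)]).getD "high" 0 + 1))
              = PySem.Dict.mk [("low", a), ("medium", b), ("high", c + 1), ("very_high", d)] := by
            apply PySem.Dict.ext
            simp [PySem.Dict.insert, PySem.Dict.getD, PySem.Dict.get?, PySem.Dict.contains]
          have g3 : (15:Int) < v := by omega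
          have g4 : ¬ (30:Int) < v := by omega
          simp only [if_neg h5, if_neg h15, if_pos h30, hA, ih a b (c+1) d]
          simp [h5, h15, g3, h30, g4]
          omega
        · have hA : ((PySem.Dict.mk [("low", a), ("medium", b), ("high", c), ("very_high", d)]).insert "very_high"
              ((PySem.Dict.mk [("low", a), ("medium", b), ("high", c), ("very_high", d)]).getD "very_high" 0 + 1))
              = PySem.Dict.mk [("low", a), ("medium", b), ("high", c), ("very_high", d + 1)] := by
            apply PySem.Dict.ext
            simp [PySem.Dict.insert, PySem.Dict.getD, PySem.Dict.get?, PySem.Dict.contains]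
          have g4 : (30:Int) < v := by omega
          simp only [if_neg h5, if_neg h15, if_neg h30, hA, ih a b c (d+1)]
          simp [h5, h15, h30, g4]
          omega

-- The two mid-range counts are differences of cumulative threshold counts.
theorem pv_count_mid (vs : List Int) (lo hi : Int) :
    (vs.countP (fun v => decide (lo < v) && decide (v ≤ hi)) : Int)
      = (vs.countP (fun v => decide (v ≤ hi)) : Int) - (vs.countP (fun v => decide (v ≤ lo)) : Int) ∨ hi < lo := by
  by_cases h : lo ≤ hi
  · left
    induction vs with
    | nil => simp
    | cons v vs ih =>
      simp only [List.countP_cons]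
      by_cases hvlo : v ≤ lo
      · have h1 : ¬ lo < v := by omega
        have h2 : v ≤ hi := by omega
        simp [hvlo, h1, h2]
        omega
      · have h1 : lo < v := by omega
        by_cases hvhi : v ≤ hi
        · simp [hvlo, hvhi, h1]
          omega
        · simp [hvlo, hvhi, h1]
          omega
  · right; omega

-- The top bucket count is length minus the cumulative ≤30 count.
theorem pv_count_top (vs : List Int) (t : Int) :
    (vs.countP (fun v => decide (t < v)) : Int)
      = (vs.length : Int) - (vs.countP (fun v => decide (v ≤ t)) : Int) := by
  induction vs with
  | nil => simp
  | cons v vs ih =>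
    simp only [List.countP_cons, List.length_cons]
    by_cases hv : v ≤ t
    · have : ¬ t < v := by omega
      simp [hv, this]
      omega
    · have : t < v := by omega
      simp [hv, this]
      omega

-- ===== VERDICT (by name: the statement is the Claim_ definition above) =====
theorem get_change_distribution_py_spec : Claim_equal_get_change_distribution_py := by
  intro file_changes _
  unfold Spec_get_change_distribution_py get_change_distribution_py get_change_distribution_py_alt
  have h0 : PySem.Dict.ofList [("low", (0:Int)), ("medium", 0), ("high", 0), ("very_high", 0)]
      = PySem.Dict.mk [("low", 0), ("medium", 0), ("high", 0), ("very_high", 0)] := rfl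
  simp only [h0, pv_fold_eq _ 0 0 0 0]
  set vs := PySem.Dict.values (PySem.Dict.ofList file_changes) with hvs
  have hm := (pv_count_mid vs 5 15).resolve_right (by omega)
  have hh := (pv_count_mid vs 15 30).resolve_right (by omega)
  have ht := pv_count_top vs 30
  simp [hm, hh, ht]
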